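-- pv_equiv track=rewrite | github.com/Ganzeroar/test_task | task_2.py | total_cost_of_apartments
-- ===== SOURCE A (Python) =====
-- class Data_type_not_valid(Exception):
--     def __init__(self, *args):
--         if args:
--             self.message = args[0]
--
-- class Invalid_parameter_value(Exception):
--     def __init__(self, *args):
--         if args:
--             self.message = args[0]
--
-- def total_cost_of_apartments(
--     number_of_floors: int,
--     cost_increasing_floor: int,
--     first_appartment_cost: int
-- ) -> int:
--
--     if type(number_of_floors) != int:
--         raise Data_type_not_valid(
--             f'Incorrect number_of_floors type: {type(number_of_floors)}')
--     if type(cost_increasing_floor) != int: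
--         raise Data_type_not_valid(
--             f'Incorrect cost_increasing_floor type: {type(cost_increasing_floor)}')
--     if type(first_appartment_cost) != int:
--         raise Data_type_not_valid(
--             f'Incorrect first_appartment_cost type: {type(first_appartment_cost)}')
--
--     if number_of_floors == 0:
--         raise Invalid_parameter_value(
--             "Incorrect number_of_floors value: can't be zero value")
--
--     COST_INCREASE = 1000
--     total_sum = 0
--     appartment_cost = first_appartment_cost
--     price_change_indicator = cost_increasing_floor
--
--     for i in range(1, number_of_floors + 1):
--         total_sum += appartment_cost
--
--         if i == price_change_indicator:
--             appartment_cost += COST_INCREASE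
--             price_change_indicator += cost_increasing_floor
--
--     return total_sum
-- ===== SOURCE B (Python) =====
-- def total_cost_of_apartments(
--     number_of_floors: int,
--     cost_increasing_floor: int,
--     first_appartment_cost: int
-- ) -> int:
--     n = number_of_floors
--     k = cost_increasing_floor
--     if n <= 0:
--         return 0
--     base = n * first_appartment_cost
--     if k <= 0:
--         return base
--     q, r = divmod(n - 1, k)
--     return base + 1000 * (k * q * (q - 1) // 2 + q * (r + 1))
-- ===== Notes on version B (the rewrite author's own statement) =====
-- stated objective: faster
-- what changed: Replaced the per-floor loop (adding the current price and bumping it every cost_increasing_floor floors) with a closed-form arithmetic-series formula using divmod grouping of floors into equal-price blocks.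
import Mathlib
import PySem

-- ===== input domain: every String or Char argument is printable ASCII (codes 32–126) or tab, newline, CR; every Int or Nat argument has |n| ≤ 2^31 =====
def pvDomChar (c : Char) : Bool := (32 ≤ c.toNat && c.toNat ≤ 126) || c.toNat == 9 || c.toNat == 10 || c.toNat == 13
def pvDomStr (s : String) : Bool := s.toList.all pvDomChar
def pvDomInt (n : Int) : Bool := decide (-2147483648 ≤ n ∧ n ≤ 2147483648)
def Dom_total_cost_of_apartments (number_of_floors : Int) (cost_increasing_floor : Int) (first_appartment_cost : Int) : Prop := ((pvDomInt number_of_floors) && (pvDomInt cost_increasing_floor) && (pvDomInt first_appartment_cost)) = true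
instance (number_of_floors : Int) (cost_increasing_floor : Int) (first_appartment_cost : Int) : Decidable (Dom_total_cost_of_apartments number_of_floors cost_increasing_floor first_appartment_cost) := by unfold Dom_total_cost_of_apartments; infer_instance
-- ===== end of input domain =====

-- B replaces A's per-floor loop by a closed-form arithmetic-series formula (O(1) instead of O(n)); A = B wherever A returns (number_of_floors ≠ 0).


-- ===== PORT A =====
-- loop body: state = (total_sum, appartment_cost, price_change_indicator)
def tcStep (cost_increasing_floor : Int) (s : Int × Int × Int) (i : Int) : Int × Int × Int :=
  let total_sum := s.1 + s.2.1
  if i = s.2.2 then (total_sum, s.2.1 + 1000, s.2.2 + cost_increasing_floor)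
  else (total_sum, s.2.1, s.2.2)

def total_cost_of_apartments (number_of_floors : Int) (cost_increasing_floor : Int) (first_appartment_cost : Int) : Int :=
  ((PySem.List.pyRange 1 (number_of_floors + 1) 1).foldl (tcStep cost_increasing_floor)
    (0, first_appartment_cost, cost_increasing_floor)).1

-- ===== PORT B =====
def total_cost_of_apartments_alt (number_of_floors : Int) (cost_increasing_floor : Int) (first_appartment_cost : Int) : Int :=
  if number_of_floors ≤ 0 then 0
  else
    let base := number_of_floors * first_appartment_cost
    if cost_increasing_floor ≤ 0 then base
    else
      let q := PySem.Int.floordiv (number_of_floors - 1) cost_increasing_floor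
      let r := PySem.Int.mod (number_of_floors - 1) cost_increasing_floor
      base + 1000 * (PySem.Int.floordiv (cost_increasing_floor * q * (q - 1)) 2 + q * (r + 1))

-- ===== PRECONDITION & SPEC =====
-- Pre_ excludes exactly number_of_floors = 0, where A raises Invalid_parameter_value.
def Pre_total_cost_of_apartments (number_of_floors : Int) (cost_increasing_floor : Int) (first_appartment_cost : Int) : Prop := number_of_floors ≠ 0
instance (number_of_floors : Int) (cost_increasing_floor : Int) (first_appartment_cost : Int) : Decidable (Pre_total_cost_of_apartments number_of_floors cost_increasing_floor first_appartment_cost) := by unfold Pre_total_cost_of_apartments; infer_instance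

def pvWitness_total_cost_of_apartments : Int × Int × Int := (5, 2, 100)

def Spec_total_cost_of_apartments (number_of_floors : Int) (cost_increasing_floor : Int) (first_appartment_cost : Int) (out : Int) : Prop := out = total_cost_of_apartments_alt number_of_floors cost_increasing_floor first_appartment_cost
instance (number_of_floors : Int) (cost_increasing_floor : Int) (first_appartment_cost : Int) (out : Int) : Decidable (Spec_total_cost_of_apartments number_of_floors cost_increasing_floor first_appartment_cost out) := by unfold Spec_total_cost_of_apartments; infer_instance

-- ===== CLAIM (what is proved, stated in full; the proofs are below) =====
def Claim_equal_total_cost_of_apartments : Prop := ∀ (number_of_floors : Int) (cost_increasing_floor : Int) (first_appartment_cost : Int), Dom_total_cost_of_apartments number_of_floors cost_increasing_floor first_appartment_cost → Pre_total_cost_of_apartments number_of_floors cost_increasing_floor first_appartment_cost → Spec_total_cost_of_apartments number_of_floors cost_increasing_floor first_appartment_cost (total_cost_of_apartments number_of_floors cost_increasing_floor first_appartment_cost)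

-- ===== LEMMAS AND PROOFS =====

-- G k n = Σ_{j=0}^{n-1} (j / k) : the number of 1000-increments paid in total over the first n floors.
def tcG (k : Int) : Nat → Int
  | 0 => 0
  | n + 1 => tcG k n + (n : Int) / k

-- characterization of A's fold when the bump never fires (k ≤ 0: indicator < 1 ≤ i always)
lemma tc_fold_nonpos (k c : Int) (hk : k ≤ 0) (n : Nat) :
    (PySem.List.pyRange 1 ((n : Int) + 1) 1).foldl (tcStep k) (0, c, k)
      = ((n : Int) * c, c, k) := by
  induction n with
  | zero => simp [PySem.List.pyRange_one_eq_nil (by omega : (0:Int) + 1 ≤ 1)]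
  | succ n ih =>
    rw [show ((n + 1 : Nat) : Int) + 1 = ((n : Int) + 1) + 1 by push_cast; ring,
      PySem.List.pyRange_one_succ_right (by omega), List.foldl_append, ih]
    have hne : (n : Int) + 1 ≠ k := by omega
    simp only [tcStep, List.foldl, if_neg hne, Prod.mk.injEq]
    refine ⟨by push_cast; ring, trivial⟩

-- characterization of A's fold for k > 0
lemma tc_fold_pos (k c : Int) (hk : 0 < k) (n : Nat) :
    (PySem.List.pyRange 1 ((n : Int) + 1) 1).foldl (tcStep k) (0, c, k)
      = ((n : Int) * c + 1000 * tcG k n, c + 1000 * ((n : Int) / k), k * ((n : Int) / k + 1)) := by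
  induction n with
  | zero =>
    simp [PySem.List.pyRange_one_eq_nil (by omega : (0:Int) + 1 ≤ 1), tcG,
      Int.zero_ediv]
  | succ n ih =>
    rw [show ((n + 1 : Nat) : Int) + 1 = ((n : Int) + 1) + 1 by push_cast; ring,
      PySem.List.pyRange_one_succ_right (by omega), List.foldl_append, ih]
    set q : Int := (n : Int) / k with hq
    set r : Int := (n : Int) % k with hr
    have hqr : k * q + r = (n : Int) := Int.ediv_add_emod (n : Int) k
    have hr0 : 0 ≤ r := Int.emod_nonneg (n : Int) (ne_of_gt hk)
    have hrk : r < k := Int.emod_lt_of_pos (n : Int) hk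
    have htcG : tcG k (n + 1) = tcG k n + q := rfl
    by_cases hcond : (n : Int) + 1 = k * (q + 1)
    · -- the bump fires: (n+1) is a multiple of k
      have hdiv : ((n : Int) + 1) / k = q + 1 := by
        rw [hcond, Int.mul_ediv_cancel_left _ (ne_of_gt hk)]
      simp only [tcStep, List.foldl, if_pos hcond, Prod.mk.injEq, htcG]
      push_cast
      rw [hdiv]
      refine ⟨by ring, by ring, by ring⟩
    · -- no bump: (n+1)/k = q
      have hrne : r + 1 ≠ k := by
        intro h
        apply hcond
        have : k * (q + 1) = k * q + k := by ring
        omega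
      have hdiv : ((n : Int) + 1) / k = q := by
        have hn1 : (n : Int) + 1 = r + 1 + k * q := by omega
        rw [hn1, Int.add_mul_ediv_left _ _ (ne_of_gt hk),
          Int.ediv_eq_zero_of_lt (by omega) (by omega), zero_add]
      simp only [tcStep, List.foldl, if_neg hcond, Prod.mk.injEq, htcG]
      push_cast
      rw [hdiv]
      refine ⟨by ring, by ring, by ring⟩
  
-- doubled closed form for tcG, avoiding the division by 2
lemma tcG_closed2 (k : Int) (hk : 0 < k) (n : Nat) (hn : 1 ≤ n) :
    2 * tcG k n = k * (((n : Int) - 1) / k) * (((n : Int) - 1) / k - 1)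
      + 2 * ((((n : Int) - 1) / k) * ((((n : Int) - 1) % k) + 1)) := by
  induction n with
  | zero => omega
  | succ n ih =>
    by_cases hn1 : n = 0
    · subst hn1
      simp [tcG, Int.zero_ediv, Int.zero_emod]
    · have ih' := ih (by omega)
      set q : Int := ((n : Int) - 1) / k with hq
      set r : Int := ((n : Int) - 1) % k with hr
      have hqr : k * q + r = (n : Int) - 1 := Int.ediv_add_emod _ k
      have hr0 : 0 ≤ r := Int.emod_nonneg _ (ne_of_gt hk)
      have hrk : r < k := Int.emod_lt_of_pos _ hk
      have hcast : ((n + 1 : Nat) : Int) - 1 = (n : Int) := by push_cast; ring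
      have htcG : 2 * tcG k (n + 1) = 2 * tcG k n + 2 * ((n : Int) / k) := by
        simp only [tcG]; ring
      rw [htcG, ih', hcast]
      by_cases hre : r + 1 = k
      · -- n is a multiple of k: n/k = q+1, n%k = 0
        have hk1 : k * (q + 1) = k * q + k := by ring
        have hn' : (n : Int) = k * (q + 1) := by omega
        have hdiv : (n : Int) / k = q + 1 := by
          rw [hn', Int.mul_ediv_cancel_left _ (ne_of_gt hk)]
        have hmod : (n : Int) % k = 0 := by
          rw [hn', Int.mul_emod_right]
        rw [hdiv, hmod, show r = k - 1 by omega]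
        ring
      · have hn' : (n : Int) = r + 1 + k * q := by omega
        have hdiv : (n : Int) / k = q := by
          rw [hn', Int.add_mul_ediv_left _ _ (ne_of_gt hk),
            Int.ediv_eq_zero_of_lt (by omega) (by omega), zero_add]
        have hmod : (n : Int) % k = r + 1 := by
          conv_lhs => rw [hn']
          rw [Int.add_mul_emod_self_left, Int.emod_eq_of_lt (by omega) (by omega)]
        rw [hdiv, hmod]
        ring

lemma tcG_closed (k : Int) (hk : 0 < k) (n : Nat) (hn : 1 ≤ n) :
    tcG k n = PySem.Int.floordiv (k * (((n : Int) - 1) / k) * (((n : Int) - 1) / k - 1)) 2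
      + (((n : Int) - 1) / k) * ((((n : Int) - 1) % k) + 1) := by
  have h2 := tcG_closed2 k hk n hn
  set q : Int := ((n : Int) - 1) / k
  set r : Int := ((n : Int) - 1) % k
  have hkey : k * q * (q - 1) = 2 * (tcG k n - q * (r + 1)) := by omega
  rw [hkey, PySem.Int.floordiv_eq_ediv_of_pos (by omega),
    Int.mul_ediv_cancel_left _ (by omega : (2:Int) ≠ 0)]
  ring

-- ===== VERDICT (by name: the statement is the Claim_ definition above) =====
theorem total_cost_of_apartments_spec : Claim_equal_total_cost_of_apartments := by
  intro n k c _ hpre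
  unfold Spec_total_cost_of_apartments total_cost_of_apartments total_cost_of_apartments_alt
  rcases lt_trichotomy n 0 with hneg | hzero | hpos
  · -- n < 0: empty range on both sides
    rw [PySem.List.pyRange_one_eq_nil (by omega), if_pos (by omega)]
    rfl
  · exact absurd hzero hpre
  · rw [if_neg (by omega)]
    obtain ⟨m, rfl⟩ : ∃ m : Nat, n = (m : Int) := ⟨n.toNat, (Int.toNat_of_nonneg hpos.le).symm⟩
    have hm1 : 1 ≤ m := by exact_mod_cast hpos
    by_cases hk : k ≤ 0
    · rw [tc_fold_nonpos k c hk m, if_pos hk]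
    · push_neg at hk
      rw [tc_fold_pos k c hk m, if_neg (by omega)]
      simp only
      rw [PySem.Int.floordiv_eq_ediv_of_pos hk, PySem.Int.mod_eq_emod_of_pos hk,
        tcG_closed k hk m hm1]
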